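-- pv_equiv track=rewrite | github.com/avidekar/python-assignments | shift_2d_array.py | shift_2d_matrix
-- ===== SOURCE A (Python) =====
-- def shift_2d_matrix(matrix, k):
--     rows, cols = len(matrix), len(matrix[0])
--     for index in range(k):
--         new_grid = [[0] * cols for index in range(rows)]
--
--         # Case 1 : Move everything not in the last column
--         for row in range(rows):
--             for col in range(cols - 1):
--                 new_grid[row][col+1] = matrix[row][col]
--
--         # Case 2 : Move everything in last column, but not the last row
--         for row in range(rows - 1):
--             new_grid[row+1][0] = matrix[row][cols - 1]
--
--         # Case 3 : Move the bottom right
--         new_grid[0][0] = matrix[rows - 1][cols - 1]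
--
--         matrix = new_grid
--
--     return matrix
-- ===== SOURCE B (Python) =====
-- def shift_2d_matrix(matrix, k):
--     rows, cols = len(matrix), len(matrix[0])
--     n = rows * cols
--     s = k % n if k > 0 else 0
--     flat = [x for row in matrix for x in row]
--     shifted = flat[n - s:] + flat[:n - s]
--     return [shifted[r * cols:(r + 1) * cols] for r in range(rows)]
-- ===== Notes on version B (the rewrite author's own statement) =====
-- stated objective: faster
-- what changed: Instead of k passes each rebuilding the grid cell by cell, B flattens the matrix once, rotates the flat list right by k mod (rows*cols) with two slices, and rebuilds the rows in one pass.
-- outside the precondition, e.g. on shift_2d_matrix([[1], [2, 3]], 0): A returns [[1], [2, 3]], B returns [[3], [1]]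
import Mathlib
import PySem

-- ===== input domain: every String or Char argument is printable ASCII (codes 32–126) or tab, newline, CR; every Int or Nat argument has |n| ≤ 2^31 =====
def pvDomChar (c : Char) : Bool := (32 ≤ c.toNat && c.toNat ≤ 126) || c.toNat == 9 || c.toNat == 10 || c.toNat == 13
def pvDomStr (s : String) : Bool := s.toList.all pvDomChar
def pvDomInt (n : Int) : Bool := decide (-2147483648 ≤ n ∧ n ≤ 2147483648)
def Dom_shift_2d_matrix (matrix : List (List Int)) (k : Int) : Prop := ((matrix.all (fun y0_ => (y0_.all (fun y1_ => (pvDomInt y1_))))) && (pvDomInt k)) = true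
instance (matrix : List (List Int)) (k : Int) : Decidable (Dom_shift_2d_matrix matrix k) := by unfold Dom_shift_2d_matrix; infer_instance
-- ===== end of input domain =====

-- B flattens the matrix once and rotates by k mod (rows*cols) instead of performing k element-by-element shift passes.
-- ===== PORT A =====
-- one iteration of A's `for index in range(k)` body; Python's in-range reads matrix[row][col]
-- are ported as getD (exact on Pre_, where every index used is in range)
def pyStep (matrix : List (List Int)) (rows cols : Nat) : List (List Int) :=
  let g0 := List.replicate rows (List.replicate cols (0 : Int))
  -- Case 1 : new_grid[row][col+1] = matrix[row][col]
  let g1 := (List.range rows).foldl (fun g row =>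
      (List.range (cols - 1)).foldl (fun g col =>
        g.set row ((g.getD row []).set (col + 1) ((matrix.getD row []).getD col 0))) g) g0
  -- Case 2 : new_grid[row+1][0] = matrix[row][cols-1]
  let g2 := (List.range (rows - 1)).foldl (fun g row =>
      g.set (row + 1) ((g.getD (row + 1) []).set 0 ((matrix.getD row []).getD (cols - 1) 0))) g1
  -- Case 3 : new_grid[0][0] = matrix[rows-1][cols-1]
  g2.set 0 ((g2.getD 0 []).set 0 ((matrix.getD (rows - 1) []).getD (cols - 1) 0))

def shift_2d_matrix (matrix : List (List Int)) (k : Int) : List (List Int) :=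
  let rows := matrix.length
  let cols := (matrix.headD []).length   -- len(matrix[0]); matrix ≠ [] on Pre_
  (List.range k.toNat).foldl (fun m _ => pyStep m rows cols) matrix

-- ===== PORT B =====
def shift_2d_matrix_alt (matrix : List (List Int)) (k : Int) : List (List Int) :=
  let rows := matrix.length
  let cols := (matrix.headD []).length
  let n : Int := (rows : Int) * (cols : Int)
  let s : Int := if k > 0 then PySem.Int.mod k n else 0    -- k % n if k > 0 else 0
  let flat := matrix.flatMap (fun row => row)
  let shifted := flat.drop (n - s).toNat ++ flat.take (n - s).toNat   -- flat[n-s:] + flat[:n-s], 0 ≤ n-s ≤ n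
  (List.range rows).map (fun r => (shifted.drop (r * cols)).take cols)  -- shifted[r*cols:(r+1)*cols]

-- ===== PRECONDITION & SPEC =====
-- Pre_ excludes the empty matrix and, for k > 0, empty rows (A raises IndexError there), and
-- non-rectangular matrices: on those A raises for most k > 0, and for k ≤ 0 it returns the ragged
-- input unchanged only because its loop body never runs — an accidental shape A never processes.
def Pre_shift_2d_matrix (matrix : List (List Int)) (k : Int) : Prop :=
  matrix ≠ [] ∧ (∀ row ∈ matrix, row.length = (matrix.headD []).length) ∧
    (0 < k → 0 < (matrix.headD []).length)
instance (matrix : List (List Int)) (k : Int) : Decidable (Pre_shift_2d_matrix matrix k) := by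
  unfold Pre_shift_2d_matrix; infer_instance

def pvWitness_shift_2d_matrix : List (List Int) × Int := ([[1, 2], [3, 4]], 3)

def Spec_shift_2d_matrix (matrix : List (List Int)) (k : Int) (out : List (List Int)) : Prop := out = shift_2d_matrix_alt matrix k
instance (matrix : List (List Int)) (k : Int) (out : List (List Int)) : Decidable (Spec_shift_2d_matrix matrix k out) := by unfold Spec_shift_2d_matrix; infer_instance

-- ===== CLAIM (what is proved, stated in full; the proofs are below) =====
def Claim_equal_shift_2d_matrix : Prop := ∀ (matrix : List (List Int)) (k : Int), Dom_shift_2d_matrix matrix k → Pre_shift_2d_matrix matrix k → Spec_shift_2d_matrix matrix k (shift_2d_matrix matrix k)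

-- ===== LEMMAS AND PROOFS =====

-- the row builder B's port uses, as a named function
def pvChunk (rows cols : Nat) (l : List Int) : List (List Int) :=
  (List.range rows).map (fun r => (l.drop (r * cols)).take cols)

theorem pv_getD_drop {α : Type} (l : List α) (p : Nat) (d : α) :
    (l.drop p).getD 0 d = l.getD p d := by
  simp [List.getD, List.getElem?_drop]

theorem pv_getD_append_len {α : Type} (A B : List α) (d : α) :
    (A ++ B).getD A.length d = B.getD 0 d := by
  simp [List.getD, List.getElem?_append_right (Nat.le_refl A.length)]

theorem pv_set_append_len {α : Type} (A B : List α) (x : α) :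
    (A ++ B).set A.length x = A ++ B.set 0 x := by
  rw [List.set_append]
  simp

theorem pv_set_zero {α : Type} (B : List α) (x : α) (h : B ≠ []) :
    B.set 0 x = x :: B.tail := by
  cases B with
  | nil => simp at h
  | cons b t => simp

theorem pv_set_at {α : Type} (A B : List α) (j : Nat) (x : α) (hj : j = A.length) (hB : B ≠ []) :
    (A ++ B).set j x = A ++ x :: B.tail := by
  subst hj
  rw [pv_set_append_len, pv_set_zero _ _ hB]

theorem pv_getD_at {α : Type} (A B : List α) (j : Nat) (d : α) (hj : j = A.length) :
    (A ++ B).getD j d = B.getD 0 d := by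
  subst hj
  exact pv_getD_append_len A B d

theorem pv_getD_set_self {α : Type} (l : List α) (i : Nat) (h : i < l.length) (x d : α) :
    (l.set i x).getD i d = x := by
  simp [List.getD, h]

theorem pv_set_getD_self {α : Type} (l : List α) (i : Nat) (h : i < l.length) (d : α) :
    l.set i (l.getD i d) = l := by
  have : l.getD i d = l[i] := by simp [List.getD, List.getElem?_eq_getElem h]
  rw [this, List.set_getElem_self]

theorem pv_map_getD_take (l : List Int) (q : Nat) (h : q ≤ l.length) :
    (List.range q).map (fun c => l.getD c 0) = l.take q := by
  apply List.ext_getElem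
  · simp; omega
  · intro i h1 h2
    simp only [List.getElem_map, List.getElem_range, List.getElem_take, List.getD]
    simp at h1
    simp [List.getElem?_eq_getElem (by omega : i < l.length)]

theorem pv_getD_map_range {α : Type} (f : Nat → α) (nn i : Nat) (h : i < nn) (d : α) :
    ((List.range nn).map f).getD i d = f i := by
  simp [List.getD, List.getElem?_map, List.getElem?_range h]

-- inner loop of Case 1 for one fixed row: sets positions 1..q of the fresh row
theorem pv_L0 (v : Nat → Int) (q : Nat) :
    ∀ start : List Int, q + 1 ≤ start.length →
    (List.range q).foldl (fun r col => r.set (col + 1) (v col)) start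
    = start.take 1 ++ (List.range q).map v ++ start.drop (q + 1) := by
  induction q with
  | zero =>
    intro start h
    simp only [List.range_zero, List.foldl_nil, List.map_nil, List.nil_append, List.append_nil]
    conv_lhs => rw [← List.take_append_drop 1 start]
  | succ q ih =>
    intro start h
    rw [List.range_succ, List.foldl_append, ih start (by omega)]
    simp only [List.foldl_cons, List.foldl_nil]
    rw [pv_set_at _ _ _ _ (by simp; omega) (by simp [← List.length_pos_iff]; omega),
      List.tail_drop]
    simp [List.map_append, List.append_assoc]

-- the Case-1 inner loop modifies only row p of the grid
theorem pv_inner (e : Nat → Int) (p : Nat) (qs : List Nat) :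
    ∀ X : List (List Int), p < X.length →
    qs.foldl (fun gg col => gg.set p ((gg.getD p []).set (col + 1) (e col))) X
    = X.set p (qs.foldl (fun r col => r.set (col + 1) (e col)) (X.getD p [])) := by
  induction qs with
  | nil =>
    intro X hp
    simp only [List.foldl_nil]
    rw [pv_set_getD_self _ _ hp]
  | cons c cs ih =>
    intro X hp
    simp only [List.foldl_cons]
    rw [ih _ (by simpa using hp), pv_getD_set_self _ _ hp, List.set_set]

-- Case 1, whole nested loop: fill every row of the fresh grid
theorem pv_L1 (e : Nat → Nat → Int) (q : Nat) (p : Nat) :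
    ∀ g : List (List Int), p ≤ g.length →
    (List.range p).foldl (fun g row =>
        (List.range q).foldl (fun g col =>
          g.set row ((g.getD row []).set (col + 1) (e row col))) g) g
    = (List.range p).map (fun row =>
        (List.range q).foldl (fun r col => r.set (col + 1) (e row col)) (g.getD row []))
      ++ g.drop p := by
  induction p with
  | zero => intro g h; simp
  | succ p ih =>
    intro g h
    rw [List.range_succ, List.foldl_append, ih g (by omega)]
    simp only [List.foldl_cons, List.foldl_nil]
    have hAlen : ((List.range p).map (fun row =>
        (List.range q).foldl (fun r col => r.set (col + 1) (e row col)) (g.getD row []))).length = p := by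
      simp
    have hXlen : p < (((List.range p).map (fun row =>
        (List.range q).foldl (fun r col => r.set (col + 1) (e row col)) (g.getD row []))) ++ g.drop p).length := by
      simp; omega
    rw [pv_inner _ _ _ _ hXlen]
    rw [pv_getD_at _ _ _ _ hAlen.symm, pv_getD_drop,
      pv_set_at _ _ _ _ hAlen.symm (by simp [← List.length_pos_iff]; omega), List.tail_drop]
    simp [List.map_append, List.append_assoc]

-- Case 2 loop: set head of rows 1..p
theorem pv_L2 (w : Nat → Int) :
    ∀ (p : Nat) (g : List (List Int)), p + 1 ≤ g.length →
    (List.range p).foldl (fun g row =>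
        g.set (row + 1) ((g.getD (row + 1) []).set 0 (w row))) g
    = g.take 1 ++ (List.range p).map (fun row => (g.getD (row + 1) []).set 0 (w row))
      ++ g.drop (p + 1) := by
  intro p
  induction p with
  | zero =>
    intro g h
    simp only [List.range_zero, List.foldl_nil, List.map_nil, List.nil_append, List.append_nil]
    conv_lhs => rw [← List.take_append_drop 1 g]
  | succ p ih =>
    intro g h
    rw [List.range_succ, List.foldl_append, ih g (by omega)]
    simp only [List.foldl_cons, List.foldl_nil]
    rw [pv_getD_at (g.take 1 ++ (List.range p).map (fun row => (g.getD (row + 1) []).set 0 (w row))) _ _ _ (by simp; omega), pv_getD_drop,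
      pv_set_at _ _ _ _ (by simp; omega) (by simp [← List.length_pos_iff]; omega), List.tail_drop]
    simp [List.map_append, List.append_assoc]

-- closed form of one Python pass over a rectangular matrix
theorem pv_step_closed (m : List (List Int)) (rows cols : Nat)
    (hr : m.length = rows) (hrows : 1 ≤ rows) (hcols : 1 ≤ cols)
    (hrect : ∀ row ∈ m, row.length = cols) :
    pyStep m rows cols
    = ((m.getD (rows - 1) []).getD (cols - 1) 0 :: (m.getD 0 []).take (cols - 1))
      :: (List.range (rows - 1)).map (fun row =>
          (m.getD row []).getD (cols - 1) 0 :: (m.getD (row + 1) []).take (cols - 1)) := by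
  have hlenrow : ∀ i, i < rows → (m.getD i []).length = cols := by
    intro i hi
    have hi' : i < m.length := by omega
    have : m.getD i [] = m[i] := by simp [List.getD, List.getElem?_eq_getElem hi']
    rw [this]
    exact hrect _ (List.getElem_mem hi')
  simp only [pyStep]
  rw [pv_L1 (fun row col => (m.getD row []).getD col 0) (cols - 1) rows _
    (by simp [hr])]
  have hg1 : ((List.range rows).map (fun row =>
      (List.range (cols - 1)).foldl (fun r col => r.set (col + 1) ((m.getD row []).getD col 0))
        ((List.replicate rows (List.replicate cols (0 : Int))).getD row []))
      ++ (List.replicate rows (List.replicate cols (0 : Int))).drop rows)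
      = (List.range rows).map (fun row => 0 :: (m.getD row []).take (cols - 1)) := by
    rw [List.drop_replicate]
    simp only [Nat.sub_self, List.replicate_zero, List.append_nil]
    apply List.map_congr_left
    intro row hrow
    simp only [List.mem_range] at hrow
    have : (List.replicate rows (List.replicate cols (0 : Int))).getD row [] = List.replicate cols 0 := by
      simp [List.getD, List.getElem?_replicate, hrow]
    rw [this, pv_L0 _ _ _ (by simp; omega)]
    rw [pv_map_getD_take _ _ (by rw [hlenrow row hrow]; omega)]
    have h1 : (List.replicate cols (0 : Int)).take 1 = [0] := by
      rw [List.take_replicate]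
      simp [Nat.min_eq_left hcols]
    have h2 : (List.replicate cols (0 : Int)).drop (cols - 1 + 1) = [] := by
      rw [List.drop_replicate]
      have : cols - 1 + 1 = cols := by omega
      simp [this]
    rw [h1, h2]
    simp
  rw [hg1]
  rw [pv_L2 _ (rows - 1) _ (by simp; omega)]
  obtain ⟨rr, rfl⟩ : ∃ rr, rows = rr + 1 := ⟨rows - 1, by omega⟩
  have htake1 : ((List.range (rr + 1)).map (fun row => 0 :: (m.getD row []).take (cols - 1))).take 1
      = [0 :: (m.getD 0 []).take (cols - 1)] := by
    rw [List.range_succ_eq_map]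
    simp
  have hdrop : ((List.range (rr + 1)).map (fun row => 0 :: (m.getD row []).take (cols - 1))).drop (rr + 1) = [] := by
    simp
  simp only [Nat.add_sub_cancel] at *
  rw [htake1, hdrop, List.append_nil]
  have hmapval : (List.range rr).map (fun row =>
      (((List.range (rr + 1)).map (fun row => 0 :: (m.getD row []).take (cols - 1))).getD (row + 1) []).set 0
        ((m.getD row []).getD (cols - 1) 0))
      = (List.range rr).map (fun row =>
          (m.getD row []).getD (cols - 1) 0 :: (m.getD (row + 1) []).take (cols - 1)) := by
    apply List.map_congr_left
    intro row hrow
    simp only [List.mem_range] at hrow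
    rw [pv_getD_map_range _ _ _ (by omega)]
    simp
  rw [hmapval]
  have hcons : ([0 :: (m.getD 0 []).take (cols - 1)] ++ (List.range rr).map (fun row =>
      (m.getD row []).getD (cols - 1) 0 :: (m.getD (row + 1) []).take (cols - 1)))
      = (0 :: (m.getD 0 []).take (cols - 1)) :: (List.range rr).map (fun row =>
      (m.getD row []).getD (cols - 1) 0 :: (m.getD (row + 1) []).take (cols - 1)) := by
    simp
  rw [hcons]
  have hgetD0 : ((0 :: (m.getD 0 []).take (cols - 1)) :: (List.range rr).map (fun row =>
      (m.getD row []).getD (cols - 1) 0 :: (m.getD (row + 1) []).take (cols - 1))).getD 0 []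
      = 0 :: (m.getD 0 []).take (cols - 1) := by
    simp [List.getD]
  rw [hgetD0]
  simp

-- length facts
theorem pv_chunk_length (rows cols : Nat) (l : List Int) : (pvChunk rows cols l).length = rows := by
  simp [pvChunk]

theorem pv_chunk_rect (rows cols : Nat) (l : List Int) (hl : l.length = rows * cols) :
    ∀ row ∈ pvChunk rows cols l, row.length = cols := by
  intro row hrow
  simp only [pvChunk, List.mem_map, List.mem_range] at hrow
  obtain ⟨r, hr, rfl⟩ := hrow
  have h1 : (r + 1) * cols ≤ rows * cols := Nat.mul_le_mul_right _ (by omega)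
  have h2 : (r + 1) * cols = r * cols + cols := by ring
  simp only [List.length_take, List.length_drop, hl]
  omega

theorem pv_chunk_getD (rows cols : Nat) (l : List Int) (r : Nat) (hr : r < rows) :
    (pvChunk rows cols l).getD r [] = (l.drop (r * cols)).take cols := by
  simp only [pvChunk]
  exact pv_getD_map_range _ _ _ hr []

-- small indexing helpers
theorem pv_getD_take (l : List Int) (q c : Nat) (h : c < q) :
    (l.take q).getD c 0 = l.getD c 0 := by
  simp [List.getD, List.getElem?_take, h]

theorem pv_getD_drop' (l : List Int) (a c : Nat) :
    (l.drop a).getD c 0 = l.getD (a + c) 0 := by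
  simp [List.getD, List.getElem?_drop]

theorem pv_drop_cons (l : List Int) (a : Nat) (h : a < l.length) :
    l.drop a = l.getD a 0 :: l.drop (a + 1) := by
  rw [← List.getElem_cons_drop h]
  simp [List.getD, List.getElem?_eq_getElem h]

-- the rotated flat list, as an explicit cons
theorem pv_rot_cons (l : List Int) (n : Nat) (hl : l.length = n) (hn : 1 ≤ n) :
    l.rotate (n - 1) = l.getD (n - 1) 0 :: l.take (n - 1) := by
  rw [List.rotate_eq_drop_append_take (by omega)]
  rw [pv_drop_cons l (n - 1) (by omega)]
  have : l.drop (n - 1 + 1) = [] := by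
    apply List.drop_eq_nil_of_le
    omega
  rw [this]
  simp

-- chunking the flattening of a rectangular matrix gives the matrix back
theorem pv_chunk_flat (m : List (List Int)) (cols : Nat)
    (h : ∀ row ∈ m, row.length = cols) :
    pvChunk m.length cols (m.flatMap (fun row => row)) = m := by
  induction m with
  | nil => simp [pvChunk]
  | cons row rest ih =>
    have hrow : row.length = cols := h row (by simp)
    have hrest : ∀ r ∈ rest, r.length = cols := fun r hr => h r (by simp [hr])
    simp only [pvChunk, List.length_cons, List.range_succ_eq_map, List.map_cons,
      List.flatMap_cons, List.map_map]
    congr 1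
    · simp [← hrow, List.take_left]
    · have := ih hrest
      simp only [pvChunk] at this
      conv_rhs => rw [← this]
      apply List.map_congr_left
      intro r _
      simp only [Function.comp]
      have hmul : (r + 1) * cols = cols + r * cols := by ring
      rw [hmul, ← List.drop_drop]
      congr 2
      rw [← hrow, List.drop_left]

-- chunking with rows+1 rows, as an explicit cons
theorem pv_chunk_succ (rr cols : Nat) (L : List Int) :
    pvChunk (rr + 1) cols L
    = L.take cols :: (List.range rr).map (fun rc => (L.drop ((rc + 1) * cols)).take cols) := by
  simp only [pvChunk, List.range_succ_eq_map, List.map_cons, List.map_map]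
  simp [Function.comp, Nat.succ_eq_add_one]

-- one Python pass on a chunked list = chunking the list rotated left by n-1 (i.e. right by 1)
theorem pv_step_chunk (rows cols : Nat) (hrows : 1 ≤ rows) (hcols : 1 ≤ cols)
    (l : List Int) (hl : l.length = rows * cols) :
    pyStep (pvChunk rows cols l) rows cols
    = pvChunk rows cols (l.rotate (rows * cols - 1)) := by
  obtain ⟨rr, rfl⟩ : ∃ rr, rows = rr + 1 := ⟨rows - 1, by omega⟩
  obtain ⟨cc, rfl⟩ : ∃ cc, cols = cc + 1 := ⟨cols - 1, by omega⟩
  have hsm : (rr + 1) * (cc + 1) = rr * (cc + 1) + (cc + 1) := by ring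
  have hn : 1 ≤ (rr + 1) * (cc + 1) := by simpa using Nat.mul_le_mul hrows hcols
  rw [pv_step_closed (pvChunk (rr + 1) (cc + 1) l) (rr + 1) (cc + 1) (pv_chunk_length _ _ _)
    hrows hcols (pv_chunk_rect _ _ _ hl)]
  conv_rhs => rw [pv_rot_cons l ((rr + 1) * (cc + 1)) hl hn, pv_chunk_succ]
  simp only [Nat.add_sub_cancel]
  congr 1
  · -- head row
    rw [pv_chunk_getD _ _ _ rr (by omega), pv_chunk_getD _ _ _ 0 (by omega)]
    rw [pv_getD_take _ _ _ (by omega), pv_getD_drop', List.take_succ_cons, List.take_take]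
    simp only [Nat.zero_mul, List.drop_zero]
    rw [List.take_take]
    congr 1
    · congr 1
      omega
    · congr 1
      omega
  · -- remaining rows
    apply List.map_congr_left
    intro rc hrc
    simp only [List.mem_range] at hrc
    rw [pv_chunk_getD _ _ _ rc (by omega), pv_chunk_getD _ _ _ (rc + 1) (by omega)]
    rw [pv_getD_take _ _ _ (by omega), pv_getD_drop']
    -- right side: drop ((rc+1)*(cc+1)) off the cons, then take cc+1
    have hpos : 1 ≤ (rc + 1) * (cc + 1) := by simpa using Nat.mul_le_mul (Nat.succ_le_succ (Nat.zero_le rc)) hcols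
    rw [show (rc + 1) * (cc + 1) = ((rc + 1) * (cc + 1) - 1) + 1 from by omega, List.drop_succ_cons]
    rw [List.drop_take]
    have hband : (rc + 2) * (cc + 1) ≤ (rr + 1) * (cc + 1) := Nat.mul_le_mul_right _ (by omega)
    have h2 : (rc + 2) * (cc + 1) = (rc + 1) * (cc + 1) + (cc + 1) := by ring
    have h1 : (rc + 1) * (cc + 1) = rc * (cc + 1) + (cc + 1) := by ring
    rw [List.take_take, List.take_take]
    rw [show min cc (cc + 1) = cc from by omega]
    rw [show min (cc + 1) ((rr + 1) * (cc + 1) - 1 - ((rc + 1) * (cc + 1) - 1)) = cc + 1 from by omega]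
    have hlt : (rc + 1) * (cc + 1) - 1 < l.length := by omega
    rw [pv_drop_cons l _ hlt, List.take_succ_cons]
    congr 2
    omega

-- iterating A's pass t times on a chunked list rotates by t*(n-1)
theorem pv_iter (rows cols : Nat) (hrows : 1 ≤ rows) (hcols : 1 ≤ cols)
    (l : List Int) (hl : l.length = rows * cols) (t : Nat) :
    (List.range t).foldl (fun m _ => pyStep m rows cols) (pvChunk rows cols l)
    = pvChunk rows cols (l.rotate ((rows * cols - 1) * t)) := by
  induction t with
  | zero => simp
  | succ t ih =>
    rw [List.range_succ, List.foldl_append, ih]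
    simp only [List.foldl_cons, List.foldl_nil]
    rw [pv_step_chunk rows cols hrows hcols _ (by simp [hl])]
    rw [List.rotate_rotate]
    congr 1

theorem pv_flat_length (m : List (List Int)) (cols : Nat)
    (h : ∀ row ∈ m, row.length = cols) :
    (m.flatMap (fun row => row)).length = m.length * cols := by
  induction m with
  | nil => simp
  | cons row rest ih =>
    simp only [List.flatMap_cons, List.length_append, List.length_cons]
    rw [h row (by simp), ih (fun r hr => h r (by simp [hr]))]
    ring

-- arithmetic: (n-1)*t and n - t % n agree modulo n
theorem pv_mod_eq (n t : Nat) (hn : 1 ≤ n) : ((n - 1) * t) % n = (n - t % n) % n := by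
  have hmul : (n - 1) * t + t = n * t := by
    have h : n - 1 + 1 = n := by omega
    calc (n - 1) * t + t = ((n - 1) + 1) * t := by ring
      _ = n * t := by rw [h]
  have e1 : (n - 1) * t + t % n ≡ 0 [MOD n] :=
    calc (n - 1) * t + t % n ≡ (n - 1) * t + t [MOD n] := Nat.ModEq.add_left _ (Nat.mod_modEq t n)
      _ = n * t := hmul
      _ ≡ 0 [MOD n] := Nat.modEq_zero_iff_dvd.mpr ⟨t, rfl⟩
  have e2 : (n - t % n) + t % n ≡ 0 [MOD n] := by
    have ht : t % n < n := Nat.mod_lt _ (by omega)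
    have h : (n - t % n) + t % n = n := by omega
    rw [h]
    exact Nat.modEq_zero_iff_dvd.mpr ⟨1, by omega⟩
  exact Nat.ModEq.add_right_cancel' _ (e1.trans e2.symm)

-- rotating by (n-1)*t is B's slice arithmetic
theorem pv_rot_count (l : List Int) (n : Nat) (hl : l.length = n) (hn : 1 ≤ n) (t : Nat) :
    l.rotate ((n - 1) * t) = l.drop (n - t % n) ++ l.take (n - t % n) := by
  rw [← List.rotate_mod l ((n - 1) * t), hl, pv_mod_eq n t hn]
  rcases Nat.eq_zero_or_pos (t % n) with h0 | hpos
  · rw [h0]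
    simp only [Nat.sub_zero, Nat.mod_self, List.rotate_zero]
    rw [← hl, List.drop_length, List.take_length]
    simp
  · have hlt : t % n < n := Nat.mod_lt _ (by omega)
    have h : (n - t % n) % n = n - t % n := Nat.mod_eq_of_lt (by omega)
    rw [h]
    exact List.rotate_eq_drop_append_take (by rw [hl]; omega)

-- ===== VERDICT (by name: the statement is the Claim_ definition above) =====
theorem shift_2d_matrix_spec : Claim_equal_shift_2d_matrix := by
  intro matrix k _ pre
  obtain ⟨hne, hrect, hposk⟩ := pre
  unfold Spec_shift_2d_matrix
  simp only [shift_2d_matrix, shift_2d_matrix_alt]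
  have hrows1 : 1 ≤ matrix.length := by
    cases matrix with
    | nil => exact absurd rfl hne
    | cons a t => simp
  have hflatlen : (matrix.flatMap (fun row => row)).length
      = matrix.length * (matrix.headD []).length := pv_flat_length _ _ hrect
  have hchunk : pvChunk matrix.length (matrix.headD []).length (matrix.flatMap (fun row => row)) = matrix :=
    pv_chunk_flat matrix _ hrect
  by_cases hk : k > 0
  · -- k > 0 : rows ≥ 1, cols ≥ 1, n ≥ 1
    have hcols1 : 1 ≤ (matrix.headD []).length := hposk hk
    set rows := matrix.length
    set cols := (matrix.headD []).length
    set flat := matrix.flatMap (fun row => row) with hflatdef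
    set n : Nat := rows * cols with hndef
    have hn1 : 1 ≤ n := Nat.mul_le_mul hrows1 hcols1
    set t : Nat := k.toNat with htdef
    have hkt : (t : Int) = k := Int.toNat_of_nonneg (by omega)
    -- A's side
    have hA : (List.range t).foldl (fun m _ => pyStep m rows cols) matrix
        = pvChunk rows cols (flat.rotate ((n - 1) * t)) := by
      rw [← hchunk]
      exact pv_iter rows cols hrows1 hcols1 flat (by rw [hflatlen]) t
    rw [hA]
    -- B's side: the if-branch and the slice arithmetic
    rw [if_pos hk]
    have hcast : (rows : Int) * (cols : Int) = (n : Int) := by push_cast [hndef]; ring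
    have hmod : PySem.Int.mod k ((rows : Int) * (cols : Int)) = ((t % n : Nat) : Int) := by
      rw [hcast, ← hkt]
      exact PySem.Int.mod_natCast t n
    rw [hmod]
    have htm : t % n < n := Nat.mod_lt _ (by omega)
    have hsub : ((n : Int) - ((t % n : Nat) : Int)).toNat = n - t % n := by omega
    rw [hcast, hsub]
    have hshift : flat.rotate ((n - 1) * t)
        = flat.drop (n - t % n) ++ flat.take (n - t % n) :=
      pv_rot_count flat n (by rw [hflatlen]) hn1 t
    rw [hshift]
    rfl
  · -- k ≤ 0 : zero passes; B rotates by 0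
    have ht0 : k.toNat = 0 := by omega
    rw [ht0]
    simp only [List.range_zero, List.foldl_nil]
    rw [if_neg hk]
    have hsub : (((matrix.length : Int) * ((matrix.headD []).length : Int)) - 0).toNat
        = matrix.length * (matrix.headD []).length := by
      push_cast
      omega
    rw [hsub]
    rw [← hflatlen, List.drop_length, List.take_length]
    simp only [List.nil_append]
    exact hchunk.symm
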